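-- pv_equiv track=rewrite | github.com/yheihei/spotify-uploader | scripts/validate_metadata.py | _is_valid_kebab_case
-- ===== SOURCE A (Python) =====
-- def _is_valid_kebab_case(text: str) -> bool:
--     """Check if text is valid kebab-case"""
--     if not text:
--         return False
--
--     # Should only contain lowercase letters, numbers, and hyphens
--     if not all(c.islower() or c.isdigit() or c == '-' for c in text):
--         return False
--
--     # Shouldn't start or end with hyphen
--     if text.startswith('-') or text.endswith('-'):
--         return False
--
--     # No consecutive hyphens
--     if '--' in text:
--         return False
--
--     return True
-- ===== SOURCE B (Python) =====
-- def _is_valid_kebab_case(text: str) -> bool: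
--     """Single pass: track the previous character; a virtual leading '-' rejects
--     a hyphen at position 0, and the final check rejects a trailing hyphen."""
--     prev = '-'
--     for c in text:
--         if not (c.islower() or c.isdigit() or c == '-'):
--             return False
--         if c == '-' and prev == '-':
--             return False
--         prev = c
--     return prev != '-'
-- ===== Notes on version B (the rewrite author's own statement) =====
-- stated objective: alternative
-- what changed: Replaced A's four separate scans (all(), startswith/endswith, '--' substring search) by one left-to-right pass tracking the previous character, with a sentinel previous '-' handling both the empty string and a leading hyphen and the final previous-character check handling a trailing hyphen.
import Mathlib
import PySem

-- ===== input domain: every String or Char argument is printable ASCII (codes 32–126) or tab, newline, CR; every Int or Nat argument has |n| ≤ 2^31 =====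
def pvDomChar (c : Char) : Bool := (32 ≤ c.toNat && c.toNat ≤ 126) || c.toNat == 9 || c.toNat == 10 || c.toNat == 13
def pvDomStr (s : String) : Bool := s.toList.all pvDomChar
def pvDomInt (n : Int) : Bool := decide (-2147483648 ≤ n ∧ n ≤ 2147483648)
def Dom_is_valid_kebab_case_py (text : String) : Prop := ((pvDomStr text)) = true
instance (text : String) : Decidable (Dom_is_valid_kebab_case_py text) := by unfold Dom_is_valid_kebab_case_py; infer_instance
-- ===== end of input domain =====

-- B replaces A's four separate scans by one pass over the characters tracking the previous one (objective: alternative).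


-- ===== PORT A =====
-- the per-character test 'c.islower() or c.isdigit() or c == "-"' (shared by both Pythons)
def kebabOk (c : Char) : Bool := PySem.Chars.islower c || PySem.Chars.isdigit c || c == '-'

def is_valid_kebab_case_py (text : String) : Bool :=
  if text = "" then false
  else if !(text.toList.all kebabOk) then false
  else if PySem.Str.startswith text "-" || PySem.Str.endswith text "-" then false
  else if PySem.Str.isIn "--" text then false
  else true

-- ===== PORT B =====
-- the for-loop of Source B: previous character as the accumulator
def kebabLoop (prev : Char) (cs : List Char) : Bool :=
  match cs with
  | [] => prev != '-'
  | c :: rest =>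
    if !kebabOk c then false
    else if c == '-' && prev == '-' then false
    else kebabLoop c rest

def is_valid_kebab_case_py_alt (text : String) : Bool :=
  kebabLoop '-' text.toList

-- ===== PRECONDITION & SPEC =====
def Spec_is_valid_kebab_case_py (text : String) (out : Bool) : Prop := out = is_valid_kebab_case_py_alt text
instance (text : String) (out : Bool) : Decidable (Spec_is_valid_kebab_case_py text out) := by unfold Spec_is_valid_kebab_case_py; infer_instance

-- ===== CLAIM (what is proved, stated in full; the proofs are below) =====
def Claim_equal_is_valid_kebab_case_py : Prop := ∀ (text : String), Dom_is_valid_kebab_case_py text → Spec_is_valid_kebab_case_py text (is_valid_kebab_case_py text)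

-- ===== LEMMAS AND PROOFS =====

-- '--' is an infix of a cons iff it starts there or is an infix of the tail
lemma dd_cons (a : Char) (l : List Char) :
    (['-', '-'] <:+: a :: l) ↔ ((a = '-' ∧ ∃ b l', l = b :: l' ∧ b = '-') ∨ ['-', '-'] <:+: l) := by
  rw [List.infix_cons_iff]
  constructor
  · rintro (h | h)
    · left
      cases l with
      | nil => rcases h with ⟨t, ht⟩; simp at ht
      | cons b l' =>
        rcases h with ⟨t, ht⟩
        simp only [List.cons_append, List.cons.injEq] at ht
        exact ⟨ht.1.symm, b, l', rfl, ht.2.1.symm⟩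
    · right; exact h
  · rintro (⟨ha, b, l', hl, hb⟩ | h)
    · left; subst hl ha hb; exact ⟨l', rfl⟩
    · right; exact h

lemma dd_cons_ne (a : Char) (c : Char) (l : List Char) (h : ¬ (c = '-' ∧ a = '-')) :
    decide (['-', '-'] <:+: a :: c :: l) = decide (['-', '-'] <:+: c :: l) := by
  simp only [decide_eq_decide, dd_cons (a := a)]
  constructor
  · rintro (⟨hp, b, l', hl, hb⟩ | hr)
    · rw [List.cons_eq_cons] at hl
      exact absurd ⟨hl.1.trans hb, hp⟩ h
    · exact hr
  · exact Or.inr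

-- characterisation of B's loop in A's terms
lemma kebabLoop_eq (cs : List Char) : ∀ (prev : Char),
    kebabLoop prev cs =
      (cs.all kebabOk && !decide (['-', '-'] <:+: prev :: cs)
        && !((prev :: cs).getLast (by simp) == '-')) := by
  induction cs with
  | nil =>
    intro prev
    have hdd : decide (['-', '-'] <:+: [prev]) = false := by
      rw [decide_eq_false_iff_not]
      rintro ⟨s, t, hst⟩
      have := congrArg List.length hst
      simp at this
      omega
    simp [kebabLoop, hdd, List.getLast, bne]
  | cons c rest ih =>
    intro prev
    simp only [kebabLoop]
    by_cases hok : kebabOk c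
    · by_cases hcp : c = '-' ∧ prev = '-'
      · obtain ⟨hc, hp⟩ := hcp
        subst hc hp
        have hddt : decide (['-', '-'] <:+: '-' :: '-' :: rest) = true := by
          rw [decide_eq_true_iff]
          exact ⟨[], rest, rfl⟩
        simp [hddt]
      · have hguard : (c == '-' && prev == '-') = false := by
          rcases not_and_or.mp hcp with h | h <;> simp [h]
        have hlast : ('-' :: c :: rest).getLast (by simp) = (c :: rest).getLast (by simp) := by
          simp [List.getLast]
        simp only [hok, Bool.not_true, if_false, Bool.false_eq_true, hguard]
        rw [ih c, dd_cons_ne prev c rest hcp]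
        have hlast2 : (prev :: c :: rest).getLast (by simp) = (c :: rest).getLast (by simp) := by
          simp [List.getLast]
        rw [hlast2]
        simp [hok]
    · simp [hok]

lemma startswith_char (c : Char) (rest : List Char) :
    PySem.Chars.startswith (c :: rest) ['-'] = (c == '-') := by
  by_cases h : c = '-'
  · subst h
    rw [show (('-' : Char) == '-') = true from rfl, PySem.Chars.startswith_iff]
    exact ⟨rest, rfl⟩
  · rw [show (c == '-') = false by simp [h], Bool.eq_false_iff, Ne, PySem.Chars.startswith_iff]
    rintro ⟨t, ht⟩
    simp only [List.cons_append, List.cons.injEq] at ht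
    exact h ht.1.symm

lemma endswith_last (cs : List Char) (h : cs ≠ []) :
    PySem.Chars.endswith cs ['-'] = (cs.getLast h == '-') := by
  by_cases hl : cs.getLast h = '-'
  · rw [show (cs.getLast h == '-') = true by simp [hl], PySem.Chars.endswith_iff]
    refine ⟨cs.dropLast, ?_⟩
    rw [← hl]
    exact List.dropLast_append_getLast h
  · rw [show (cs.getLast h == '-') = false by simp [hl], Bool.eq_false_iff, Ne,
      PySem.Chars.endswith_iff]
    rintro ⟨t, ht⟩
    apply hl
    subst ht
    rw [List.getLast_append_of_ne_nil _ (by simp)]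
    rfl

theorem is_valid_kebab_case_py_eq (text : String) :
    is_valid_kebab_case_py text = is_valid_kebab_case_py_alt text := by
  unfold is_valid_kebab_case_py is_valid_kebab_case_py_alt
  rw [kebabLoop_eq]
  have hempty : (text = "") ↔ (text.toList = []) := by
    constructor
    · intro h; simp [h]
    · intro h; exact String.ext (by simpa using h)
  cases hcs : text.toList with
  | nil =>
    rw [if_pos (hempty.mpr hcs)]
    simp [List.getLast]
  | cons c rest =>
    rw [if_neg (fun h => by simp [hempty.mp h] at hcs)]
    have hsw : PySem.Str.startswith text "-" = (c == '-') := by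
      rw [PySem.Str.startswith_eq]
      simp only [hcs]
      exact startswith_char c rest
    have hew : PySem.Str.endswith text "-" = ((c :: rest).getLast (by simp) == '-') := by
      rw [PySem.Str.endswith_eq]
      simp only [hcs]
      exact endswith_last _ (by simp)
    have hin : PySem.Str.isIn "--" text = decide (['-', '-'] <:+: c :: rest) := by
      by_cases hi : ['-', '-'] <:+: c :: rest
      · rw [decide_eq_true hi, PySem.Str.isIn_iff_infix]
        show "--".toList <:+: text.toList
        rw [hcs]
        exact hi
      · rw [decide_eq_false hi, Bool.eq_false_iff, Ne, PySem.Str.isIn_iff_infix]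
        intro hif
        apply hi
        rw [hcs] at hif
        exact hif
    have hlast : ('-' :: c :: rest).getLast (by simp) = (c :: rest).getLast (by simp) := by
      simp [List.getLast]
    have hdd : decide (['-', '-'] <:+: '-' :: c :: rest)
        = ((c == '-') || decide (['-', '-'] <:+: c :: rest)) := by
      by_cases h : c = '-'
      · subst h
        rw [show (('-' : Char) == '-') = true from rfl, Bool.true_or, decide_eq_true_iff]
        exact ⟨[], rest, rfl⟩
      · rw [show (c == '-') = false by simp [h], Bool.false_or]
        exact dd_cons_ne '-' c rest (fun hc => h hc.1)
    rw [hsw, hew, hin, hdd, hlast]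
    cases hall : (c :: rest).all kebabOk <;>
      cases hc : (c == '-') <;>
        cases hinf : decide (['-', '-'] <:+: c :: rest) <;>
          cases hl : ((c :: rest).getLast (by simp) == '-') <;> simp

-- ===== VERDICT (by name: the statement is the Claim_ definition above) =====
theorem is_valid_kebab_case_py_spec : Claim_equal_is_valid_kebab_case_py := by
  intro text _
  unfold Spec_is_valid_kebab_case_py
  exact is_valid_kebab_case_py_eq text
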